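-- pv_equiv track=rewrite | github.com/Abubakkar13/Infytq-assignment-solution | Programming Fundamentals using Python/Day-3/Assgn-22.py | find_leap_years
-- ===== SOURCE A (Python) =====
-- def find_leap_years(given_year):
--     list_of_leap_years = list()
--     # Write your logic here
--     while True:
--         if given_year%4==0 and given_year%100!=0 or given_year%400==0:
--             given_year += 4
--             break
--         given_year += 1
--     for _ in range(15):
--         list_of_leap_years.append(given_year)
--         given_year += 4
--     return list_of_leap_years
-- ===== SOURCE B (Python) =====
-- def find_leap_years(given_year):
--     # first multiple of 4 at or after given_year
--     c = given_year + (-given_year) % 4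
--     # a non-leap century must be skipped to the next multiple of 4
--     L = c + 4 if c % 100 == 0 and c % 400 != 0 else c
--     return list(range(L + 4, L + 64, 4))
-- ===== Notes on version B (the rewrite author's own statement) =====
-- stated objective: simpler
-- what changed: Replaces the unit-step while-loop search for the next leap year with a closed-form computation (next multiple of four plus one century correction) and replaces the fixed-length append loop with a single range() call.
import Mathlib
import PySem

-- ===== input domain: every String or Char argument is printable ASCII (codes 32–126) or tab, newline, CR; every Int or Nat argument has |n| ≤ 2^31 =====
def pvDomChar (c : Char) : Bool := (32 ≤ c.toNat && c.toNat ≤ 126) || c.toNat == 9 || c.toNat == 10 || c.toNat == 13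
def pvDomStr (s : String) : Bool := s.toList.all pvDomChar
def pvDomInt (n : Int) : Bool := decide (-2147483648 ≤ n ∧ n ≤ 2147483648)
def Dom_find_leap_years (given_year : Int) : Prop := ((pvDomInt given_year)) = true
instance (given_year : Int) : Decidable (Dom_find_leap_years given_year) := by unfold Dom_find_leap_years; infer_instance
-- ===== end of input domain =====

-- B replaces A's unit-step while-loop search and append loop by closed-form arithmetic plus one range(); objective: simpler.

-- ===== PORT A =====
-- while True: scan upward by 1 until the leap condition holds, then return year+4.
-- The fuel argument is a totality guard only: 8 steps always suffice (pvScan_fuel_eq below).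
def pvScanFuel : Nat → Int → Int
  | 0, y => y
  | n + 1, y =>
    if PySem.Int.mod y 4 = 0 ∧ PySem.Int.mod y 100 ≠ 0 ∨ PySem.Int.mod y 400 = 0 then y + 4
    else pvScanFuel n (y + 1)

def find_leap_years (given_year : Int) : List Int :=
  let g := pvScanFuel 8 given_year
  ((List.range 15).foldl (fun (st : List Int × Int) _ => (st.1 ++ [st.2], st.2 + 4)) ([], g)).1

-- ===== PORT B =====
def find_leap_years_alt (given_year : Int) : List Int :=
  let c := given_year + PySem.Int.mod (-given_year) 4
  let L := if PySem.Int.mod c 100 = 0 ∧ PySem.Int.mod c 400 ≠ 0 then c + 4 else c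
  PySem.List.pyRange (L + 4) (L + 64) 4

-- ===== PRECONDITION & SPEC =====
def Spec_find_leap_years (given_year : Int) (out : List Int) : Prop := out = find_leap_years_alt given_year
instance (given_year : Int) (out : List Int) : Decidable (Spec_find_leap_years given_year out) := by unfold Spec_find_leap_years; infer_instance

-- ===== CLAIM (what is proved, stated in full; the proofs are below) =====
def Claim_equal_find_leap_years : Prop := ∀ (given_year : Int), Dom_find_leap_years given_year → Spec_find_leap_years given_year (find_leap_years given_year)

-- ===== LEMMAS AND PROOFS =====

-- closed-form first leap year >= y; used only to prove the scan's fuel bound (proof side)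
def pvNextLeap (y : Int) : Int :=
  let c := y + PySem.Int.mod (-y) 4
  if PySem.Int.mod c 100 = 0 ∧ PySem.Int.mod c 400 ≠ 0 then c + 4 else c

theorem pvNextLeap_eq_self (y : Int)
    (h : PySem.Int.mod y 4 = 0 ∧ PySem.Int.mod y 100 ≠ 0 ∨ PySem.Int.mod y 400 = 0) :
    pvNextLeap y = y := by
  unfold pvNextLeap
  simp only [PySem.Int.mod_eq_emod_of_pos (by norm_num : (0:Int) < 4),
    PySem.Int.mod_eq_emod_of_pos (by norm_num : (0:Int) < 100),
    PySem.Int.mod_eq_emod_of_pos (by norm_num : (0:Int) < 400)] at h ⊢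
  split_ifs <;> omega

theorem pvNextLeap_step (y : Int)
    (h : ¬(PySem.Int.mod y 4 = 0 ∧ PySem.Int.mod y 100 ≠ 0 ∨ PySem.Int.mod y 400 = 0)) :
    pvNextLeap (y + 1) = pvNextLeap y ∧ y < pvNextLeap y := by
  unfold pvNextLeap
  simp only [PySem.Int.mod_eq_emod_of_pos (by norm_num : (0:Int) < 4),
    PySem.Int.mod_eq_emod_of_pos (by norm_num : (0:Int) < 100),
    PySem.Int.mod_eq_emod_of_pos (by norm_num : (0:Int) < 400)] at h ⊢
  split_ifs <;> omega

theorem pvNextLeap_le (y : Int) : pvNextLeap y ≤ y + 7 := by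
  unfold pvNextLeap
  simp only [PySem.Int.mod_eq_emod_of_pos (by norm_num : (0:Int) < 4)]
  split_ifs <;> omega

theorem pvNextLeap_ge (y : Int) : y ≤ pvNextLeap y := by
  unfold pvNextLeap
  simp only [PySem.Int.mod_eq_emod_of_pos (by norm_num : (0:Int) < 4)]
  split_ifs <;> omega

-- with enough fuel, A's while loop returns (first leap year ≥ y) + 4
theorem pvScan_fuel_eq (n : Nat) (y : Int) (hfuel : pvNextLeap y - y < n) :
    pvScanFuel n y = pvNextLeap y + 4 := by
  induction n generalizing y with
  | zero => exact absurd hfuel (by have := pvNextLeap_ge y; omega)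
  | succ m ih =>
    rw [pvScanFuel]
    split_ifs with h
    · rw [pvNextLeap_eq_self y h]
    · have hs := pvNextLeap_step y h
      rw [ih (y + 1) (by omega)]
      rw [hs.1]

theorem pvScan_eq (y : Int) : pvScanFuel 8 y = pvNextLeap y + 4 := by
  have := pvNextLeap_le y
  exact pvScan_fuel_eq 8 y (by omega)

-- A's append loop builds acc ++ [g, g+4, …, g+4*(n-1)]
theorem pvFold_eq (n : Nat) (acc : List Int) (g : Int) :
    (List.range n).foldl (fun (st : List Int × Int) _ => (st.1 ++ [st.2], st.2 + 4)) (acc, g)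
      = (acc ++ (List.range n).map (fun k : Nat => g + 4 * (k : Int)), g + 4 * n) := by
  induction n generalizing acc g with
  | zero => simp
  | succ m ih =>
    rw [List.range_succ, List.foldl_append, ih]
    simp
    ring

theorem find_leap_years_spec' (y : Int) : find_leap_years y = find_leap_years_alt y := by
  dsimp only [find_leap_years, find_leap_years_alt]
  rw [pvScan_eq, pvFold_eq]
  unfold pvNextLeap
  dsimp only
  set L := if PySem.Int.mod (y + PySem.Int.mod (-y) 4) 100 = 0 ∧
      PySem.Int.mod (y + PySem.Int.mod (-y) 4) 400 ≠ 0
    then y + PySem.Int.mod (-y) 4 + 4 else y + PySem.Int.mod (-y) 4 with hL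
  rw [PySem.List.pyRange_of_pos _ _ (by norm_num : (0:Int) < 4)]
  rw [if_pos (by omega : L + 4 < L + 64)]
  have h63 : L + 64 - (L + 4) + 4 - 1 = 63 := by ring
  rw [h63]
  norm_num
  apply List.map_congr_left
  intro k _
  ring

-- ===== VERDICT (by name: the statement is the Claim_ definition above) =====
theorem find_leap_years_spec : Claim_equal_find_leap_years := by
  intro y _
  exact find_leap_years_spec' y
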